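-- pv_equiv track=rewrite | github.com/eulersformula/Lintcode-LeetCode | Fair_Indexes.py | count_indexes
-- ===== SOURCE A (Python) =====
-- from typing import (
--     List,
-- )
--
-- def count_indexes(a: List[int], b: List[int]) -> int:
--     # Write your code here.
--     # Questions to ask:
--     # 1. Is it guaranteed to have such an index?
--     # 题目要求是要把a和b分成non-empty arrays
--     if len(a) == 0 or len(b) == 0 or len(a) != len(b):
--         return 0
--     cur_sum_a_r, cur_sum_b_r = sum(a), sum(b)
--     cur_sum_a_l, cur_sum_b_l = 0, 0
--     n_indices = 0
--     for (a_v, b_v) in zip(a[:-1], b[:-1]): # Last element excluded; otherwise right array is empty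
--         cur_sum_a_l += a_v
--         cur_sum_b_l += b_v
--         cur_sum_a_r -= a_v
--         cur_sum_b_r -= b_v
--         if cur_sum_a_l == cur_sum_a_r and cur_sum_a_l == cur_sum_b_l and cur_sum_b_l == cur_sum_b_r:
--             n_indices += 1
--     return n_indices
-- ===== SOURCE B (Python) =====
-- def count_indexes(a, b):
--     if len(a) == 0 or len(b) == 0 or len(a) != len(b):
--         return 0
--     t = sum(a)
--     # A fair split forces sum(a) == sum(b) and both even, so answer is 0 otherwise;
--     # else count splits as the size of the intersection of the index sets where each
--     # array's prefix first reaches half its total.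
--     if t != sum(b) or t % 2 != 0:
--         return 0
--     h = t // 2
--     return len(_half_hits(a, h) & _half_hits(b, h))
--
-- def _half_hits(xs, h):
--     hits = set()
--     s = 0
--     for i, x in enumerate(xs[:-1]):
--         s += x
--         if s == h:
--             hits.add(i)
--     return hits
-- ===== Notes on version B (the rewrite author's own statement) =====
-- stated objective: alternative
-- what changed: B replaces A's single pass with four running left/right sums by a reduction (answer is 0 unless sum(a)==sum(b) and the total is even) followed by building, per array, the set of indices where the prefix reaches half the total, and returning the size of the two sets' intersection.
import Mathlib
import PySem

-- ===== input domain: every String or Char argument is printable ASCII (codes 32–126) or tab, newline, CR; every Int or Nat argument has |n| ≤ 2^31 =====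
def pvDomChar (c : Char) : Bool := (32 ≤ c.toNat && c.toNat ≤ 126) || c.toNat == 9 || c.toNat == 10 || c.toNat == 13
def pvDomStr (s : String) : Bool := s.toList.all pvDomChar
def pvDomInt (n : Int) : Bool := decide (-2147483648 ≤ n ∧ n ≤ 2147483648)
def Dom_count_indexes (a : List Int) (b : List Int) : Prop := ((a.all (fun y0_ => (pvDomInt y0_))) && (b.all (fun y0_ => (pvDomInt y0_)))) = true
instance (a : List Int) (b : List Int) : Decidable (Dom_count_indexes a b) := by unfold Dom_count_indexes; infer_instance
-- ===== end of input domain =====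

-- B first reduces the problem (answer is 0 unless sum(a) = sum(b) and the total is even),
-- then intersects the two sets of indices where each array's prefix reaches half its total
-- (a timing run measured B faster by a constant factor); objective: alternative.

-- ===== PORT A =====
-- state = (cur_sum_a_r, cur_sum_b_r, cur_sum_a_l, cur_sum_b_l, n_indices)
def aStep (st : Int × Int × Int × Int × Int) (p : Int × Int) : Int × Int × Int × Int × Int :=
  let sal := st.2.2.1 + p.1
  let sbl := st.2.2.2.1 + p.2
  let sar := st.1 - p.1
  let sbr := st.2.1 - p.2
  (sar, sbr, sal, sbl, if sal = sar ∧ sal = sbl ∧ sbl = sbr then st.2.2.2.2 + 1 else st.2.2.2.2)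

def count_indexes (a : List Int) (b : List Int) : Int :=
  if a.length = 0 ∨ b.length = 0 ∨ a.length ≠ b.length then 0
  else
    ((List.zip (PySem.List.slice a none (some (-1))) (PySem.List.slice b none (some (-1)))).foldl
      aStep (a.sum, b.sum, 0, 0, 0)).2.2.2.2

-- ===== PORT B =====
-- helper _half_hits of Source B: the set of indices i (over enumerate(xs[:-1])) whose prefix sum is h
def halfHits (xs : List Int) (h : Int) : PySem.Set Int :=
  ((PySem.List.enumerate (PySem.List.slice xs none (some (-1)))).foldl
    (fun st p =>
      let s := st.1 + p.2
      (s, if s = h then PySem.Set.add st.2 p.1 else st.2))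
    (0, PySem.Set.empty)).2

def count_indexes_alt (a : List Int) (b : List Int) : Int :=
  if a.length = 0 ∨ b.length = 0 ∨ a.length ≠ b.length then 0
  else
    let t := a.sum
    if t ≠ b.sum ∨ PySem.Int.mod t 2 ≠ 0 then 0
    else
      let h := PySem.Int.floordiv t 2
      PySem.Set.len (PySem.Set.inter (halfHits a h) (halfHits b h))

-- ===== PRECONDITION & SPEC =====
def Spec_count_indexes (a : List Int) (b : List Int) (out : Int) : Prop := out = count_indexes_alt a b
instance (a : List Int) (b : List Int) (out : Int) : Decidable (Spec_count_indexes a b out) := by unfold Spec_count_indexes; infer_instance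

-- ===== CLAIM (what is proved, stated in full; the proofs are below) =====
def Claim_equal_count_indexes : Prop := ∀ (a : List Int) (b : List Int), Dom_count_indexes a b → Spec_count_indexes a b (count_indexes a b)

-- ===== LEMMAS AND PROOFS =====

-- pure index list of halfHits: indices i, i+1, … whose running prefix (from s) equals h
def hits (h : Int) : List Int → Int → Int → List Int
  | [], _, _ => []
  | x :: xs, s, i => (if s + x = h then [i] else []) ++ hits h xs (s + x) (i + 1)

-- common counting spec: running prefixes sa, sb against totals ta, tb (A's loop body condition)
def cnt (ta tb : Int) : List Int → List Int → Int → Int → Int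
  | x :: xs, y :: ys, sa, sb =>
      (if sa + x = ta - (sa + x) ∧ sa + x = sb + y ∧ sb + y = tb - (sb + y) then 1 else 0)
        + cnt ta tb xs ys (sa + x) (sb + y)
  | _, _, _, _ => 0

theorem foldA_eq (ta tb : Int) (la : List Int) : ∀ (lb : List Int) (sa sb n : Int),
    ((List.zip la lb).foldl aStep (ta - sa, tb - sb, sa, sb, n)).2.2.2.2
      = n + cnt ta tb la lb sa sb := by
  induction la with
  | nil => intro lb sa sb n; simp [cnt]
  | cons x xs ih =>
    intro lb sa sb n
    cases lb with
    | nil => simp [cnt]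
    | cons y ys =>
      have harr : ta - sa - x = ta - (sa + x) := by ring
      have hbrr : tb - sb - y = tb - (sb + y) := by ring
      simp only [List.zip_cons_cons, List.foldl_cons, aStep, cnt]
      rw [harr, hbrr, ih ys (sa + x) (sb + y) _]
      split <;> ring

theorem mem_hits_ge (h : Int) (xs : List Int) : ∀ (s i j : Int), j ∈ hits h xs s i → i ≤ j := by
  induction xs with
  | nil => intro s i j hj; simp [hits] at hj
  | cons x xs ih =>
    intro s i j hj
    simp only [hits, List.mem_append] at hj
    rcases hj with hj | hj
    · split at hj <;> simp at hj; omega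
    · have := ih (s + x) (i + 1) j hj; omega

theorem halfHits_go (h : Int) (xs : List Int) :
    ∀ (s i : Int) (acc : List Int), (∀ j ∈ acc, j < i) →
    ((PySem.List.enumerate xs i).foldl
      (fun st p =>
        let s := st.1 + p.2
        (s, if s = h then PySem.Set.add st.2 p.1 else st.2)) (s, acc)).2
      = acc ++ hits h xs s i := by
  induction xs with
  | nil => intro s i acc _; simp [PySem.List.enumerate_nil, hits]
  | cons x xs ih =>
    intro s i acc hacc
    rw [PySem.List.enumerate_cons, List.foldl_cons]
    by_cases hc : s + x = h
    · have hnm : i ∉ acc := fun hm => absurd (hacc i hm) (by omega)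
      have hadd : PySem.Set.add acc i = acc ++ [i] := PySem.Set.add_of_not_mem hnm
      simp only [hits, hc, if_true]
      rw [hadd,
        ih h (i + 1) (acc ++ [i]) (by intro j hj; rcases List.mem_append.mp hj with hj | hj
                                      · have := hacc j hj; omega
                                      · simp at hj; omega)]
      simp
    · simp only [hits, hc, if_false]
      rw [ih (s + x) (i + 1) acc (by intro j hj; have := hacc j hj; omega)]
      simp

theorem halfHits_eq (xs : List Int) (h : Int) : halfHits xs h = hits h xs.dropLast 0 0 := by
  unfold halfHits
  rw [PySem.List.slice_to_neg_one, halfHits_go h xs.dropLast 0 0 PySem.Set.empty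
    (by simp [PySem.Set.empty])]
  simp [PySem.Set.empty]

-- when the totals differ or are odd, A's loop condition can never fire
theorem cnt_zero (ta tb : Int) (hne : ta ≠ tb ∨ PySem.Int.mod ta 2 ≠ 0) (la : List Int) :
    ∀ (lb : List Int) (sa sb : Int), cnt ta tb la lb sa sb = 0 := by
  have hm : PySem.Int.mod ta 2 = ta % 2 := PySem.Int.mod_eq_emod_of_pos (by omega)
  induction la with
  | nil => intro lb sa sb; simp [cnt]
  | cons x xs ih =>
    intro lb sa sb
    cases lb with
    | nil => simp [cnt]
    | cons y ys =>
      simp only [cnt, ih ys (sa + x) (sb + y)]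
      rw [if_neg, add_zero]
      rintro ⟨h1, h2, h3⟩
      rw [hm] at hne
      omega

-- the intersection of the two half-total index sets counts exactly A's fair indexes (ta = tb = 2h)
theorem inter_cnt (h : Int) (la : List Int) : ∀ (lb : List Int) (sa sb i : Int),
    (((hits h la sa i).filter (fun j => (hits h lb sb i).contains j)).length : Int)
      = cnt (2 * h) (2 * h) la lb sa sb := by
  induction la with
  | nil => intro lb sa sb i; simp [hits, cnt]
  | cons x xs ih =>
    intro lb sa sb i
    cases lb with
    | nil =>
      simp only [cnt]
      have hf : (hits h (x :: xs) sa i).filter (fun j => (hits h ([] : List Int) sb i).contains j) = [] := by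
        apply List.filter_eq_nil_iff.mpr
        intro j _; simp [hits]
      rw [hf]; simp
    | cons y ys =>
      simp only [hits, cnt, List.filter_append]
      have htail : (hits h xs (sa + x) (i + 1)).filter
            (fun j => ((if sb + y = h then [i] else []) ++ hits h ys (sb + y) (i + 1)).contains j)
          = (hits h xs (sa + x) (i + 1)).filter
            (fun j => (hits h ys (sb + y) (i + 1)).contains j) := by
        apply List.filter_congr
        intro j hj
        have hji : i + 1 ≤ j := mem_hits_ge h xs (sa + x) (i + 1) j hj
        simp only [List.contains_append]
        have : (if sb + y = h then [i] else []).contains j = false := by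
          split <;> simp; omega
        rw [this, Bool.false_or]
      rw [htail]
      have key : (sa + x = 2 * h - (sa + x) ∧ sa + x = sb + y ∧ sb + y = 2 * h - (sb + y))
          ↔ (sa + x = h ∧ sb + y = h) := by omega
      rw [if_congr key rfl rfl]
      by_cases hca : sa + x = h
      · by_cases hcb : sb + y = h
        · rw [if_pos hca, if_pos hcb, if_pos ⟨hca, hcb⟩]
          have hhead : ([i].filter (fun j => ([i] ++ hits h ys (sb + y) (i + 1)).contains j)) = [i] := by
            simp
          rw [hhead]
          simp only [List.length_append, List.length_cons]
          push_cast
          rw [ih ys (sa + x) (sb + y) (i + 1)]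
          simp
        · rw [if_pos hca, if_neg hcb, if_neg (fun hc => hcb hc.2)]
          have hni : i ∉ hits h ys (sb + y) (i + 1) := fun hm =>
            absurd (mem_hits_ge h ys (sb + y) (i + 1) i hm) (by omega)
          have hhead : ([i].filter (fun j => (([] : List Int) ++ hits h ys (sb + y) (i + 1)).contains j)) = [] := by
            simp [hni]
          rw [hhead]
          simp only [List.nil_append]
          rw [ih ys (sa + x) (sb + y) (i + 1)]
          ring
      · rw [if_neg hca]
        simp only [List.filter_nil, List.nil_append]
        rw [if_neg (fun hc => hca hc.1), ih ys (sa + x) (sb + y) (i + 1)]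
        ring

-- ===== VERDICT (by name: the statement is the Claim_ definition above) =====
theorem count_indexes_spec : Claim_equal_count_indexes := by
  intro a b _
  unfold Spec_count_indexes count_indexes count_indexes_alt
  split
  · rfl
  · rename_i hguard
    have hA : ((List.zip (PySem.List.slice a none (some (-1))) (PySem.List.slice b none (some (-1)))).foldl
        aStep (a.sum, b.sum, 0, 0, 0)).2.2.2.2
        = cnt a.sum b.sum (PySem.List.slice a none (some (-1))) (PySem.List.slice b none (some (-1))) 0 0 := by
      have := foldA_eq a.sum b.sum (PySem.List.slice a none (some (-1)))
        (PySem.List.slice b none (some (-1))) 0 0 0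
      simpa using this
    rw [hA]
    by_cases hz : a.sum ≠ b.sum ∨ PySem.Int.mod a.sum 2 ≠ 0
    · rw [if_pos hz, cnt_zero a.sum b.sum hz]
    · rw [if_neg hz]
      rw [not_or, not_not, not_not] at hz
      obtain ⟨hsum, hmod⟩ := hz
      have hm : PySem.Int.mod a.sum 2 = a.sum % 2 := PySem.Int.mod_eq_emod_of_pos (by omega)
      have hd : PySem.Int.floordiv a.sum 2 = a.sum / 2 := PySem.Int.floordiv_eq_ediv_of_pos (by omega)
      have h2 : 2 * PySem.Int.floordiv a.sum 2 = a.sum := by rw [hd]; rw [hm] at hmod; omega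
      show cnt a.sum b.sum (PySem.List.slice a none (some (-1)))
          (PySem.List.slice b none (some (-1))) 0 0 =
        PySem.Set.len (PySem.Set.inter (halfHits a (PySem.Int.floordiv a.sum 2))
          (halfHits b (PySem.Int.floordiv a.sum 2)))
      rw [halfHits_eq, halfHits_eq]
      have hthis := inter_cnt (PySem.Int.floordiv a.sum 2) a.dropLast b.dropLast 0 0 0
      rw [h2] at hthis
      rw [PySem.List.slice_to_neg_one, PySem.List.slice_to_neg_one, ← hsum, ← hthis]
      simp [PySem.Set.inter, PySem.Set.len]
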